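-- pv_equiv track=rewrite | github.com/eborlee/resonance | app/services/router.py | max_interval
-- ===== SOURCE A (Python) =====
-- from typing import Dict, List, Optional
--
-- INTERVAL_RANK: Dict[str, int] = {
--     "30s": 0,
--     "1m": 1,
--     "3m": 2,
--     "5m": 3,
--     "15m": 4,
--     "30m": 5,
--     "45m": 6,
--     "1h": 7,
--     "2h": 8,
--     "4h": 9,
--     "6h": 10,
--     "8h": 11,
--     "12h": 12,
--     "1d": 13,
--     "1w": 14,
-- }
--
-- def rank_of(iv: str) -> int:
--     """
--     返回周期 rank，未知周期返回 -1
--     """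
--     return INTERVAL_RANK.get(iv, -1)
--
-- def max_interval(intervals_present: List[str]) -> Optional[str]:
--     """
--     在给定 intervals 中找出“最大周期”（最慢周期）
--     """
--     best_iv = None
--     best_rank = -1
--     for iv in intervals_present:
--         r = rank_of(iv)
--         if r > best_rank:
--             best_rank = r
--             best_iv = iv
--     return best_iv
-- ===== SOURCE B (Python) =====
-- from typing import List, Optional
--
-- # Known intervals from highest rank (slowest) to lowest rank (fastest).
-- ORDER_DESC: List[str] = [
--     "1w", "1d", "12h", "8h", "6h", "4h", "2h", "1h",
--     "45m", "30m", "15m", "5m", "3m", "1m", "30s",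
-- ]
--
-- def max_interval(intervals_present: List[str]) -> Optional[str]:
--     present = set(intervals_present)
--     for iv in ORDER_DESC:
--         if iv in present:
--             return iv
--     return None
-- ===== Notes on version B (the rewrite author's own statement) =====
-- stated objective: idiomatic
-- what changed: Instead of a single accumulator pass tracking the best rank over the input, B builds a set of the input once and scans the fixed rank table from highest to lowest rank, returning the first interval present.
import Mathlib
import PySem

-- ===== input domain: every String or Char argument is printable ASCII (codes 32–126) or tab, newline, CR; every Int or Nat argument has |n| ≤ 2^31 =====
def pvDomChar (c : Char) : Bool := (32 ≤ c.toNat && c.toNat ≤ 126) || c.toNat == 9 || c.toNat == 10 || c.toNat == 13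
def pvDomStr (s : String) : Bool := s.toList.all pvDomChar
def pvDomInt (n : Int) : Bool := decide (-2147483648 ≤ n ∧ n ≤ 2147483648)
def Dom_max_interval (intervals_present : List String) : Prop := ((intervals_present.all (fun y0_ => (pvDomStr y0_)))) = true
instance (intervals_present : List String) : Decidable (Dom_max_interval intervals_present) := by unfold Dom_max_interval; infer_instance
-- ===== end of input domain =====

-- B replaces A's accumulator pass over the input by a scan of the fixed rank table
-- from highest to lowest rank with a set-membership test (idiomatic; not claimed faster).

-- ===== PORT A =====
def INTERVAL_RANK : PySem.Dict String Int := PySem.Dict.ofList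
  [("30s",0),("1m",1),("3m",2),("5m",3),("15m",4),("30m",5),("45m",6),("1h",7),
   ("2h",8),("4h",9),("6h",10),("8h",11),("12h",12),("1d",13),("1w",14)]

def rank_of (iv : String) : Int := INTERVAL_RANK.getD iv (-1)

def max_interval (intervals_present : List String) : Option String :=
  (intervals_present.foldl
    (fun st iv =>
      let r := rank_of iv
      if r > st.2 then (some iv, r) else st)
    (none, -1)).1

-- ===== PORT B =====
def ORDER_DESC : List String :=
  ["1w","1d","12h","8h","6h","4h","2h","1h","45m","30m","15m","5m","3m","1m","30s"]

def max_interval_alt (intervals_present : List String) : Option String :=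
  let present : PySem.Set String := PySem.Set.ofList intervals_present
  ORDER_DESC.find? (fun iv => present.contains iv)

-- ===== PRECONDITION & SPEC =====
def Spec_max_interval (intervals_present : List String) (out : Option String) : Prop := out = max_interval_alt intervals_present
instance (intervals_present : List String) (out : Option String) : Decidable (Spec_max_interval intervals_present out) := by unfold Spec_max_interval; infer_instance

-- ===== CLAIM (what is proved, stated in full; the proofs are below) =====
def Claim_equal_max_interval : Prop := ∀ (intervals_present : List String), Dom_max_interval intervals_present → Spec_max_interval intervals_present (max_interval intervals_present)

-- ===== LEMMAS AND PROOFS =====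

theorem rank_mk : INTERVAL_RANK = PySem.Dict.mk
  [("30s",0),("1m",1),("3m",2),("5m",3),("15m",4),("30m",5),("45m",6),("1h",7),
   ("2h",8),("4h",9),("6h",10),("8h",11),("12h",12),("1d",13),("1w",14)] := by decide

theorem rank_basic (iv : String) : -1 ≤ rank_of iv ∧ (-1 < rank_of iv → iv ∈ ORDER_DESC) := by
  by_cases h1 : "30s" = iv; · subst h1; exact ⟨by decide, fun _ => by decide⟩
  by_cases h2 : "1m" = iv; · subst h2; exact ⟨by decide, fun _ => by decide⟩
  by_cases h3 : "3m" = iv; · subst h3; exact ⟨by decide, fun _ => by decide⟩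
  by_cases h4 : "5m" = iv; · subst h4; exact ⟨by decide, fun _ => by decide⟩
  by_cases h5 : "15m" = iv; · subst h5; exact ⟨by decide, fun _ => by decide⟩
  by_cases h6 : "30m" = iv; · subst h6; exact ⟨by decide, fun _ => by decide⟩
  by_cases h7 : "45m" = iv; · subst h7; exact ⟨by decide, fun _ => by decide⟩
  by_cases h8 : "1h" = iv; · subst h8; exact ⟨by decide, fun _ => by decide⟩
  by_cases h9 : "2h" = iv; · subst h9; exact ⟨by decide, fun _ => by decide⟩
  by_cases h10 : "4h" = iv; · subst h10; exact ⟨by decide, fun _ => by decide⟩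
  by_cases h11 : "6h" = iv; · subst h11; exact ⟨by decide, fun _ => by decide⟩
  by_cases h12 : "8h" = iv; · subst h12; exact ⟨by decide, fun _ => by decide⟩
  by_cases h13 : "12h" = iv; · subst h13; exact ⟨by decide, fun _ => by decide⟩
  by_cases h14 : "1d" = iv; · subst h14; exact ⟨by decide, fun _ => by decide⟩
  by_cases h15 : "1w" = iv; · subst h15; exact ⟨by decide, fun _ => by decide⟩
  have hz : rank_of iv = -1 := by
    simp only [rank_of, rank_mk, PySem.Dict.getD_eq_get?_getD, PySem.Dict.get?_mk_cons,
      beq_iff_eq, h1, h2, h3, h4, h5, h6, h7, h8, h9, h10, h11, h12, h13, h14, h15,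
      if_false]
    rfl
  exact ⟨by omega, fun h => absurd h (by omega)⟩

theorem order_pairwise : ORDER_DESC.Pairwise (fun a b => rank_of b < rank_of a) := by decide

theorem order_pos : ∀ s ∈ ORDER_DESC, -1 < rank_of s := by decide

theorem order_inj : ∀ s ∈ ORDER_DESC, ∀ t ∈ ORDER_DESC, rank_of s = rank_of t → s = t := by decide

-- "out is the (unique, by rank) highest-ranked known interval of L, or none if L has none"
def Best (L : List String) (o : Option String) : Prop :=
  (o = none ∧ ∀ iv ∈ L, rank_of iv = -1) ∨
  (∃ s, o = some s ∧ s ∈ L ∧ -1 < rank_of s ∧ ∀ iv ∈ L, rank_of iv ≤ rank_of s)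

def stepA (st : Option String × Int) (iv : String) : Option String × Int :=
  if rank_of iv > st.2 then (some iv, rank_of iv) else st

theorem foldA (L : List String) :
    (L.foldl stepA (none, -1) = (none, -1) ∧ ∀ iv ∈ L, rank_of iv = -1) ∨
    (∃ s, L.foldl stepA (none, -1) = (some s, rank_of s) ∧ s ∈ L ∧ -1 < rank_of s ∧
      ∀ iv ∈ L, rank_of iv ≤ rank_of s) := by
  induction L using List.reverseRecOn with
  | nil => left; simp
  | append_singleton L a ih =>
    rw [List.foldl_append]
    rcases ih with ⟨hst, hall⟩ | ⟨s, hst, hmem, hpos, hall⟩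
    · rw [hst]
      by_cases hr : rank_of a > -1
      · right
        refine ⟨a, ?_, by simp, hr, ?_⟩
        · simp [stepA, hr]
        · intro iv hiv
          rcases List.mem_append.mp hiv with h | h
          · have := hall iv h; omega
          · simp at h; subst h; exact le_refl _
      · left
        have ha : rank_of a = -1 := by have := (rank_basic a).1; omega
        constructor
        · simp [stepA, hr]
        · intro iv hiv
          rcases List.mem_append.mp hiv with h | h
          · exact hall iv h
          · simp at h; subst h; exact ha
    · rw [hst]
      by_cases hr : rank_of a > rank_of s
      · right
        refine ⟨a, by simp [stepA, hr], by simp, by omega, ?_⟩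
        intro iv hiv
        rcases List.mem_append.mp hiv with h | h
        · have := hall iv h; omega
        · simp at h; subst h; exact le_refl _
      · right
        refine ⟨s, by simp [stepA, hr], List.mem_append_left _ hmem, hpos, ?_⟩
        intro iv hiv
        rcases List.mem_append.mp hiv with h | h
        · exact hall iv h
        · simp at h; subst h; omega

theorem max_interval_eq_foldA (L : List String) :
    max_interval L = (L.foldl stepA (none, -1)).1 := by
  unfold max_interval stepA
  rfl

theorem findB (T : List String) (L : List String)
    (hcov : ∀ iv ∈ L, -1 < rank_of iv → iv ∈ T)
    (hpw : T.Pairwise (fun a b => rank_of b < rank_of a))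
    (hpos : ∀ s ∈ T, -1 < rank_of s) :
    Best L (T.find? (fun s => (PySem.Set.ofList L).contains s)) := by
  induction T with
  | nil =>
    left
    refine ⟨rfl, fun iv hiv => ?_⟩
    have h1 := (rank_basic iv).1
    by_contra h
    exact absurd (hcov iv hiv (by omega)) (List.not_mem_nil)
  | cons t T ih =>
    by_cases hc : ((PySem.Set.ofList L).contains t : Bool) = true
    · rw [List.find?_cons_of_pos hc]
      have htL : t ∈ L := by have h' := (PySem.Set.contains_iff _ _).mp hc; rwa [PySem.Set.mem_ofList] at h'
      right
      refine ⟨t, rfl, htL, hpos t List.mem_cons_self, fun iv hiv => ?_⟩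
      by_cases hp : -1 < rank_of iv
      · rcases List.mem_cons.mp (hcov iv hiv hp) with h | h
        · exact h ▸ le_refl _
        · have := (List.pairwise_cons.mp hpw).1 iv h; omega
      · have := hpos t List.mem_cons_self; have := (rank_basic iv).1; omega
    · rw [List.find?_cons_of_neg (by simpa using hc)]
      have htL : t ∉ L := fun h => hc ((PySem.Set.contains_iff _ _).mpr (by rwa [PySem.Set.mem_ofList]))
      refine ih (fun iv hiv hp => ?_) (List.pairwise_cons.mp hpw).2
        (fun s hs => hpos s (List.mem_cons_of_mem _ hs))
      rcases List.mem_cons.mp (hcov iv hiv hp) with h | h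
      · exact absurd (h ▸ hiv) htL
      · exact h

theorem Best_unique (L : List String) (o1 o2 : Option String)
    (h1 : Best L o1) (h2 : Best L o2) : o1 = o2 := by
  rcases h1 with ⟨e1, a1⟩ | ⟨s, e1, m1, p1, a1⟩ <;>
    rcases h2 with ⟨e2, a2⟩ | ⟨t, e2, m2, p2, a2⟩
  · rw [e1, e2]
  · have := a1 t m2; omega
  · have := a2 s m1; omega
  · have hle1 := a1 t m2
    have hle2 := a2 s m1
    have heq : rank_of s = rank_of t := le_antisymm hle2 hle1
    have hsO := (rank_basic s).2 p1
    have htO := (rank_basic t).2 p2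
    rw [e1, e2, order_inj s hsO t htO heq]

-- ===== VERDICT (by name: the statement is the Claim_ definition above) =====
theorem max_interval_spec : Claim_equal_max_interval := by
  intro L _
  unfold Spec_max_interval
  have hA : Best L (max_interval L) := by
    rw [max_interval_eq_foldA]
    rcases foldA L with ⟨hst, hall⟩ | ⟨s, hst, hmem, hpos, hall⟩
    · left; exact ⟨by rw [hst], hall⟩
    · right; exact ⟨s, by rw [hst], hmem, hpos, hall⟩
  have hB : Best L (max_interval_alt L) := by
    show Best L (ORDER_DESC.find? (fun s => (PySem.Set.ofList L).contains s))
    exact findB ORDER_DESC L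
      (fun iv hiv hp => (rank_basic iv).2 hp) order_pairwise order_pos
  exact Best_unique L _ _ hA hB
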